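-- pv_equiv track=rewrite | github.com/ODCS1/PersonalTechStudies | python/exercicios/lista8/ex13.py | contar_ocorrencias_while
-- ===== SOURCE A (Python) =====
-- def contar_ocorrencias_while(vetor_grande: tuple[int], vetor_pequeno: tuple[int]) -> int:
--     if not isinstance(vetor_grande, tuple) or not isinstance(vetor_pequeno, tuple):
--         raise ValueError
--
--     count = 0
--     i = 0
--     while i < len(vetor_pequeno):
--         j = 0
--         while j < len(vetor_grande):
--             if vetor_grande[j] == vetor_pequeno[i]:
--                 count += 1
--             j += 1
--         i += 1
--     return count
-- ===== SOURCE B (Python) =====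
-- def contar_ocorrencias_while(vetor_grande: tuple[int], vetor_pequeno: tuple[int]) -> int:
--     if not isinstance(vetor_grande, tuple) or not isinstance(vetor_pequeno, tuple):
--         raise ValueError
--
--     freq = {}
--     for x in vetor_grande:
--         freq[x] = freq.get(x, 0) + 1
--     return sum(freq.get(x, 0) for x in vetor_pequeno)
-- ===== Notes on version B (the rewrite author's own statement) =====
-- stated objective: faster
-- what changed: Replaced the nested index-based while loops (scanning all of vetor_grande for each element of vetor_pequeno) with a single pass that builds a frequency dictionary of vetor_grande once and then sums lookups over vetor_pequeno.
import Mathlib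
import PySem

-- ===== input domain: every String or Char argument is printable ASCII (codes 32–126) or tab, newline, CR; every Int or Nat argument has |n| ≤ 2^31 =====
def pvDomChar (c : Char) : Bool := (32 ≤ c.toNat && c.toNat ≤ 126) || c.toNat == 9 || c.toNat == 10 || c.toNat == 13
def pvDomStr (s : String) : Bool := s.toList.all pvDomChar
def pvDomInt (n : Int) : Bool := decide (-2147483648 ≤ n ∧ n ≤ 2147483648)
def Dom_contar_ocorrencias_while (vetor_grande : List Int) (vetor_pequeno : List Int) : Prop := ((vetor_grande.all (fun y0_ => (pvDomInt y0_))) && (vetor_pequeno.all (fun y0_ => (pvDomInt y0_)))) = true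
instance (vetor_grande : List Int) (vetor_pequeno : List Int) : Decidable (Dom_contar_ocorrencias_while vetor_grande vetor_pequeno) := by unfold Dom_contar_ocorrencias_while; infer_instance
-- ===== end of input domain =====

-- ===== PORT A =====
-- Port of A: nested index while-loops as folds over pyRange; B below builds a frequency dict once (faster).
def contar_ocorrencias_while (vetor_grande : List Int) (vetor_pequeno : List Int) : Int :=
  (PySem.List.pyRange 0 (PySem.List.len vetor_pequeno) 1).foldl (fun count i =>
    (PySem.List.pyRange 0 (PySem.List.len vetor_grande) 1).foldl (fun c j =>
      if PySem.List.pyGetD vetor_grande j 0 == PySem.List.pyGetD vetor_pequeno i 0 then c + 1 else c)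
      count) 0

-- ===== PORT B =====
def contar_ocorrencias_while_alt (vetor_grande : List Int) (vetor_pequeno : List Int) : Int :=
  let freq : PySem.Dict Int Int :=
    vetor_grande.foldl (fun d x => d.insert x (d.getD x 0 + 1)) PySem.Dict.empty
  vetor_pequeno.foldl (fun s x => s + freq.getD x 0) 0

-- ===== PRECONDITION & SPEC =====
def Spec_contar_ocorrencias_while (vetor_grande : List Int) (vetor_pequeno : List Int) (out : Int) : Prop := out = contar_ocorrencias_while_alt vetor_grande vetor_pequeno
instance (vetor_grande : List Int) (vetor_pequeno : List Int) (out : Int) : Decidable (Spec_contar_ocorrencias_while vetor_grande vetor_pequeno out) := by unfold Spec_contar_ocorrencias_while; infer_instance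

-- ===== CLAIM (what is proved, stated in full; the proofs are below) =====
def Claim_equal_contar_ocorrencias_while : Prop := ∀ (vetor_grande : List Int) (vetor_pequeno : List Int), Dom_contar_ocorrencias_while vetor_grande vetor_pequeno → Spec_contar_ocorrencias_while vetor_grande vetor_pequeno (contar_ocorrencias_while vetor_grande vetor_pequeno)

-- ===== LEMMAS AND PROOFS =====

-- ===== VERDICT (by name: the statement is the Claim_ definition above) =====
theorem contar_ocorrencias_while_spec : Claim_equal_contar_ocorrencias_while := by
  intro g p _
  unfold Spec_contar_ocorrencias_while contar_ocorrencias_while contar_ocorrencias_while_alt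
  rw [PySem.List.foldl_pyRange_zero_pyGetD p 0
        (fun count x => (PySem.List.pyRange 0 (PySem.List.len g) 1).foldl
          (fun c j => if PySem.List.pyGetD g j 0 == x then c + 1 else c) count) 0]
  rw [PySem.Dict.foldl_insert_getD_add_one_eq_counter]
  have h1 :
      List.foldl (fun count x =>
        List.foldl (fun c j => if PySem.List.pyGetD g j 0 == x then c + 1 else c) count
          (PySem.List.pyRange 0 (PySem.List.len g) 1)) 0 p
      = List.foldl (fun count x => count + (g.count x : Int)) 0 p :=
    PySem.List.foldl_congr_mem p _ _ 0 (by
      intro acc x _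
      rw [PySem.List.foldl_pyRange_zero_pyGetD g 0
            (fun c y => if y == x then c + 1 else c) acc]
      exact PySem.List.foldl_beq_add_one g x acc)
  have h2 :
      List.foldl (fun s x => s + (PySem.Dict.counter g).getD x 0) 0 p
      = List.foldl (fun count x => count + (g.count x : Int)) 0 p :=
    PySem.List.foldl_congr_mem p _ _ 0 (by
      intro acc x _
      rw [PySem.Dict.getD_counter])
  exact h1.trans h2.symm
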